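-- pv_equiv track=rewrite | github.com/wmeijer221/my_python_utils | wmeijer_utils/iterators.py | tuple_chain
-- ===== SOURCE A (Python) =====
-- from typing import Iterator, List, Callable, TypeVar, Tuple, Dict
--
-- T = TypeVar("T")
--
-- def tuple_chain(
--     iterator: Iterator[T], yield_first: bool = False, yield_last: bool = False
-- ) -> "Iterator[Tuple[T | None, T | None]]":
--     """Returns tuples of entries. Given [a, b, c, d], it outputs [(a,b), (b,c), (c,d)]"""
--     if not isinstance(iterator, Iterator):
--         iterator = iter(iterator)
--
--     previous = None
--     current = next(iterator)
--
--     if yield_first: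
--         yield previous, current
--
--     for entry in iterator:
--         previous = current
--         current = entry
--         yield previous, current
--
--     if yield_last:
--         yield current, None
-- ===== SOURCE B (Python) =====
-- def tuple_chain(iterator, yield_first=False, yield_last=False):
--     """Returns tuples of entries. Given [a, b, c, d], it outputs [(a,b), (b,c), (c,d)]"""
--     seq = ([None] if yield_first else []) + list(iterator) + ([None] if yield_last else [])
--     return list(zip(seq, seq[1:]))
-- ===== Notes on version B (the rewrite author's own statement) =====
-- stated objective: simpler
-- what changed: Instead of a stateful previous/current generator loop with three separate emission sites, B materializes the stream, pads it with None sentinels according to the flags, and produces all pairs uniformly as zip(seq, seq[1:]); the first/last boundary pairs are no longer special cases.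
import Mathlib
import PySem

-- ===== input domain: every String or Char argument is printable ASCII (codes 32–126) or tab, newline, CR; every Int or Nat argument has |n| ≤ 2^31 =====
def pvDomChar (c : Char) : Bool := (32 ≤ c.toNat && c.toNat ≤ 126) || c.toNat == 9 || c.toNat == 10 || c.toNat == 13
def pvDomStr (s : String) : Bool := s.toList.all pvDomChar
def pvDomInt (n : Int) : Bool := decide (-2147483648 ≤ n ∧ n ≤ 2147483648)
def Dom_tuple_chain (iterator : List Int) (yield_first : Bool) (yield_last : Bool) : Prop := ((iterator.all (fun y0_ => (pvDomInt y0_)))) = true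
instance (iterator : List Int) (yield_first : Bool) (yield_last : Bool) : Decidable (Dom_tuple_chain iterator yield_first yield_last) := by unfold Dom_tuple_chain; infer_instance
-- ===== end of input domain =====

-- B replaces A's stateful previous/current loop with three emission sites by a sentinel-padded sequence zipped with its own tail; return values only (A is a generator in Python).

-- ===== PORT A =====
-- the 'for entry in iterator' loop: carries 'current', yields (previous, current) pairs,
-- and returns the final value of 'current' (needed for the yield_last case)
def tupleChainLoopA (current : Int) (rest : List Int) : List (Option Int × Option Int) × Int :=
  match rest with
  | [] => ([], current)
  | entry :: rs =>
      let r := tupleChainLoopA entry rs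
      ((some current, some entry) :: r.1, r.2)

def tuple_chain (iterator : List Int) (yield_first : Bool) (yield_last : Bool) : List (Option Int × Option Int) :=
  match iterator with
  | [] => []  -- unreachable under Pre_: 'next(iterator)' raises in Python
  | current :: rest =>
      let first := if yield_first then [((none : Option Int), some current)] else []
      let r := tupleChainLoopA current rest
      first ++ r.1 ++ (if yield_last then [(some r.2, (none : Option Int))] else [])

-- ===== PORT B =====
def tuple_chain_alt (iterator : List Int) (yield_first : Bool) (yield_last : Bool) : List (Option Int × Option Int) :=
  -- seq = ([None] if yield_first else []) + list(iterator) + ([None] if yield_last else [])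
  let seq : List (Option Int) :=
    (if yield_first then [none] else []) ++ iterator.map some ++ (if yield_last then [none] else [])
  -- list(zip(seq, seq[1:]))
  List.zip seq (PySem.List.slice seq (some 1) none)

-- ===== PRECONDITION & SPEC =====
-- A raises (StopIteration → RuntimeError per PEP 479) on the empty iterator; excluded.
def Pre_tuple_chain (iterator : List Int) (yield_first : Bool) (yield_last : Bool) : Prop := iterator ≠ []
instance (iterator : List Int) (yield_first : Bool) (yield_last : Bool) : Decidable (Pre_tuple_chain iterator yield_first yield_last) := by unfold Pre_tuple_chain; infer_instance
def pvWitness_tuple_chain : List Int × Bool × Bool := ([1, 2, 3], true, true)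

def Spec_tuple_chain (iterator : List Int) (yield_first : Bool) (yield_last : Bool) (out : List (Option Int × Option Int)) : Prop := out = tuple_chain_alt iterator yield_first yield_last
instance (iterator : List Int) (yield_first : Bool) (yield_last : Bool) (out : List (Option Int × Option Int)) : Decidable (Spec_tuple_chain iterator yield_first yield_last out) := by unfold Spec_tuple_chain; infer_instance

-- ===== CLAIM =====
def Claim_equal_tuple_chain : Prop := ∀ (iterator : List Int) (yield_first : Bool) (yield_last : Bool), Dom_tuple_chain iterator yield_first yield_last → Pre_tuple_chain iterator yield_first yield_last → Spec_tuple_chain iterator yield_first yield_last (tuple_chain iterator yield_first yield_last)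

-- ===== LEMMAS AND PROOFS =====
-- A's loop result, characterised as zip-with-tail plus the last element.
theorem tupleChainLoopA_eq (current : Int) (rest : List Int) :
    tupleChainLoopA current rest =
      (List.zip ((current :: rest).map some) (rest.map some), rest.getLastD current) := by
  induction rest generalizing current with
  | nil => simp [tupleChainLoopA]
  | cons e rs ih =>
      simp [tupleChainLoopA, ih e, List.zip]
      cases rs with
      | nil => simp
      | cons h t =>
          obtain ⟨x, hx⟩ := Option.isSome_iff_exists.mp
            (List.getLast?_isSome.mpr (List.cons_ne_nil h t))
          simp [hx]

-- appending the trailing sentinel adds exactly one final pair to the zip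
theorem zip_pad_last (c : Int) (rest : List Int) :
    List.zipWith Prod.mk (some c :: (rest.map some ++ [(none : Option Int)])) (rest.map some ++ [(none : Option Int)]) =
      List.zipWith Prod.mk (some c :: rest.map some) (rest.map some) ++ [(some (rest.getLastD c), none)] := by
  induction rest generalizing c with
  | nil => simp
  | cons e rs ih =>
      rw [List.getLastD_cons]
      simpa using ih e

-- ===== VERDICT =====
theorem tuple_chain_spec : Claim_equal_tuple_chain := by
  intro iterator yield_first yield_last _ hpre
  match iterator with
  | [] => exact absurd rfl hpre
  | c :: rest =>
      simp only [Spec_tuple_chain, tuple_chain, tuple_chain_alt, tupleChainLoopA_eq,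
        PySem.List.slice_from_one]
      cases yield_first <;> cases yield_last <;>
        simp [List.zip, zip_pad_last]
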